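-- pv_equiv track=rewrite | github.com/milhud/diffusion_downscaling_model | scripts/build_cache.py | _month_for_day
-- ===== SOURCE A (Python) =====
-- def _month_for_day(day_of_year, leap=False):
--     days_in_month = [31, 29 if leap else 28, 31, 30, 31, 30, 31, 31, 30, 31, 30, 31]
--     cum = 0
--     for m, d in enumerate(days_in_month):
--         cum += d
--         if day_of_year <= cum:
--             return m
--     return 11
-- ===== SOURCE B (Python) =====
-- _CUM_NORMAL = [31, 59, 90, 120, 151, 181, 212, 243, 273, 304, 334, 365]
-- _CUM_LEAP = [31, 60, 91, 121, 152, 182, 213, 244, 274, 305, 335, 366]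
--
--
-- def _month_for_day(day_of_year, leap=False):
--     cum = _CUM_LEAP if leap else _CUM_NORMAL
--     lo, hi = 0, 12
--     while lo < hi:
--         mid = (lo + hi) // 2
--         if cum[mid] < day_of_year:
--             lo = mid + 1
--         else:
--             hi = mid
--     return min(lo, 11)
-- ===== Notes on version B (the rewrite author's own statement) =====
-- stated objective: alternative
-- what changed: Replaced the sequential scan with a running sum by a precomputed cumulative-days table and a binary search (bisect_left style) clamped to 11.
import Mathlib
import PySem

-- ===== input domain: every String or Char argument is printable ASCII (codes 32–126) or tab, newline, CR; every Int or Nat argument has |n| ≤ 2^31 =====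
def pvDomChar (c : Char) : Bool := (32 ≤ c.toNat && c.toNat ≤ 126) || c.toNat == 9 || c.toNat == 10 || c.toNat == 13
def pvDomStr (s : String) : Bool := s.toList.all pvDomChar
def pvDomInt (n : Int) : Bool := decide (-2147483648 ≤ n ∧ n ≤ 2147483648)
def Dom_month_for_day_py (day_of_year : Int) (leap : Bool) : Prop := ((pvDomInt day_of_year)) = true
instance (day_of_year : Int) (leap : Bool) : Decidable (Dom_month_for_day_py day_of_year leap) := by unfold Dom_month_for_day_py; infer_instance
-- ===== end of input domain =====

-- B replaces A's sequential running-sum scan by a precomputed cumulative-days table and a binary search clamped to 11 (alternative decomposition, same cost at n = 12).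

-- ===== PORT A =====
-- the enumerate loop of A: m is the running index, cum the running sum; early return on day ≤ cum, else 11
def monthLoopA (day : Int) (cum : Int) (m : Int) : List Int → Int
  | [] => 11
  | d :: rest => if day ≤ cum + d then m else monthLoopA day (cum + d) (m + 1) rest

def month_for_day_py (day_of_year : Int) (leap : Bool) : Int :=
  monthLoopA day_of_year 0 0 [31, if leap then 29 else 28, 31, 30, 31, 30, 31, 31, 30, 31, 30, 31]

-- ===== PORT B =====
def cumNormal : List Int := [31, 59, 90, 120, 151, 181, 212, 243, 273, 304, 334, 365]
def cumLeap : List Int := [31, 60, 91, 121, 152, 182, 213, 244, 274, 305, 335, 366]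

-- the `while lo < hi` binary search of B, recursion on the shrinking window
def bsearchB (cum : List Int) (x : Int) (lo hi : Nat) : Nat :=
  if _h : lo < hi then
    if cum.getD ((lo + hi) / 2) 0 < x then bsearchB cum x ((lo + hi) / 2 + 1) hi
    else bsearchB cum x lo ((lo + hi) / 2)
  else lo
termination_by hi - lo
decreasing_by all_goals omega

def month_for_day_py_alt (day_of_year : Int) (leap : Bool) : Int :=
  let cum := if leap then cumLeap else cumNormal
  min ((bsearchB cum day_of_year 0 12 : Nat) : Int) 11

-- ===== PRECONDITION & SPEC =====
def Spec_month_for_day_py (day_of_year : Int) (leap : Bool) (out : Int) : Prop := out = month_for_day_py_alt day_of_year leap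
instance (day_of_year : Int) (leap : Bool) (out : Int) : Decidable (Spec_month_for_day_py day_of_year leap out) := by unfold Spec_month_for_day_py; infer_instance

-- ===== CLAIM (what is proved, stated in full; the proofs are below) =====
def Claim_equal_month_for_day_py : Prop := ∀ (day_of_year : Int) (leap : Bool), Dom_month_for_day_py day_of_year leap → Spec_month_for_day_py day_of_year leap (month_for_day_py day_of_year leap)

-- ===== LEMMAS AND PROOFS =====
-- binary-search correctness: on a window [lo, hi) of a list that is monotone below hi,
-- the result r keeps every index left of r strictly below x and every index in [r, hi) at least x
lemma bs_correct (cum : List Int) (x : Int) (lo hi : Nat)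
    (hmono : ∀ i j : Nat, i ≤ j → j < cum.length → cum.getD i 0 ≤ cum.getD j 0)
    (hlen : hi ≤ cum.length) :
    lo ≤ bsearchB cum x lo hi ∧ bsearchB cum x lo hi ≤ max lo hi ∧
    (∀ i, lo ≤ i → i < bsearchB cum x lo hi → cum.getD i 0 < x) ∧
    (∀ i, bsearchB cum x lo hi ≤ i → i < hi → ¬ cum.getD i 0 < x) := by
  fun_induction bsearchB cum x lo hi with
  | case1 lo hi _h hc ih =>
    rcases ih hlen with ⟨i1, i2, i3, i4⟩
    refine ⟨by omega, by omega, ?_, ?_⟩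
    · intro i hi1 hi2
      rcases Nat.lt_or_ge i ((lo + hi) / 2 + 1) with h | h
      · calc cum.getD i 0 ≤ cum.getD ((lo + hi) / 2) 0 := hmono _ _ (by omega) (by omega)
          _ < x := hc
      · exact i3 i h hi2
    · exact i4
  | case2 lo hi _h hc ih =>
    rcases ih (by omega) with ⟨i1, i2, i3, i4⟩
    refine ⟨i1, by omega, i3, ?_⟩
    intro i hi1 hi2
    rcases Nat.lt_or_ge i ((lo + hi) / 2) with h | h
    · exact i4 i hi1 h
    · intro hlt
      exact hc (lt_of_le_of_lt (hmono _ _ h (by omega)) hlt)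
  | case3 lo hi _h =>
    exact ⟨le_refl _, by omega, by omega, by omega⟩

lemma cumNormal_mono : ∀ i j : Nat, i ≤ j → j < cumNormal.length → cumNormal.getD i 0 ≤ cumNormal.getD j 0 := by
  intro i j hij hj
  have hj' : j < 12 := by simpa [cumNormal] using hj
  interval_cases j <;> interval_cases i <;> norm_num [cumNormal]

lemma cumLeap_mono : ∀ i j : Nat, i ≤ j → j < cumLeap.length → cumLeap.getD i 0 ≤ cumLeap.getD j 0 := by
  intro i j hij hj
  have hj' : j < 12 := by simpa [cumLeap] using hj
  interval_cases j <;> interval_cases i <;> norm_num [cumLeap]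

-- ===== VERDICT (by name: the statement is the Claim_ definition above) =====
theorem month_for_day_py_spec : Claim_equal_month_for_day_py := by
  intro day leap _
  unfold Spec_month_for_day_py month_for_day_py month_for_day_py_alt
  cases leap
  · -- leap = false
    show monthLoopA day 0 0 [31, 28, 31, 30, 31, 30, 31, 31, 30, 31, 30, 31] = min ((bsearchB cumNormal day 0 12 : Nat) : Int) 11
    obtain ⟨hb1, hb2, hb3, hb4⟩ := bs_correct cumNormal day 0 12 cumNormal_mono (by norm_num [cumNormal])
    have hb2' : bsearchB cumNormal day 0 12 ≤ 12 := by simpa using hb2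
    generalize hgen : bsearchB cumNormal day 0 12 = r at hb1 hb2' hb3 hb4 ⊢
    simp only [monthLoopA]
    by_cases g0 : day ≤ 0 + 31
    · rw [if_pos g0]
      have hu : r ≤ 0 := by
        by_contra hcon
        push_neg at hcon
        have hv := hb3 0 (by omega) (by omega)
        norm_num [cumNormal] at hv
        omega
      have hreq : r = 0 := by omega
      rw [hreq]
      norm_num
    · rw [if_neg g0]
      by_cases g1 : day ≤ 0 + 31 + 28
      · rw [if_pos g1]
        have hu : r ≤ 1 := by
          by_contra hcon
          push_neg at hcon
          have hv := hb3 1 (by omega) (by omega)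
          norm_num [cumNormal] at hv
          omega
        have hl : 1 ≤ r := by
          by_contra hcon
          push_neg at hcon
          have hv := hb4 0 (by omega) (by omega)
          norm_num [cumNormal] at hv
          omega
        have hreq : r = 1 := by omega
        rw [hreq]
        norm_num
      · rw [if_neg g1]
        by_cases g2 : day ≤ 0 + 31 + 28 + 31
        · rw [if_pos g2]
          have hu : r ≤ 2 := by
            by_contra hcon
            push_neg at hcon
            have hv := hb3 2 (by omega) (by omega)
            norm_num [cumNormal] at hv
            omega
          have hl : 2 ≤ r := by
            by_contra hcon
            push_neg at hcon
            have hv := hb4 1 (by omega) (by omega)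
            norm_num [cumNormal] at hv
            omega
          have hreq : r = 2 := by omega
          rw [hreq]
          norm_num
        · rw [if_neg g2]
          by_cases g3 : day ≤ 0 + 31 + 28 + 31 + 30
          · rw [if_pos g3]
            have hu : r ≤ 3 := by
              by_contra hcon
              push_neg at hcon
              have hv := hb3 3 (by omega) (by omega)
              norm_num [cumNormal] at hv
              omega
            have hl : 3 ≤ r := by
              by_contra hcon
              push_neg at hcon
              have hv := hb4 2 (by omega) (by omega)
              norm_num [cumNormal] at hv
              omega
            have hreq : r = 3 := by omega
            rw [hreq]
            norm_num
          · rw [if_neg g3]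
            by_cases g4 : day ≤ 0 + 31 + 28 + 31 + 30 + 31
            · rw [if_pos g4]
              have hu : r ≤ 4 := by
                by_contra hcon
                push_neg at hcon
                have hv := hb3 4 (by omega) (by omega)
                norm_num [cumNormal] at hv
                omega
              have hl : 4 ≤ r := by
                by_contra hcon
                push_neg at hcon
                have hv := hb4 3 (by omega) (by omega)
                norm_num [cumNormal] at hv
                omega
              have hreq : r = 4 := by omega
              rw [hreq]
              norm_num
            · rw [if_neg g4]
              by_cases g5 : day ≤ 0 + 31 + 28 + 31 + 30 + 31 + 30
              · rw [if_pos g5]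
                have hu : r ≤ 5 := by
                  by_contra hcon
                  push_neg at hcon
                  have hv := hb3 5 (by omega) (by omega)
                  norm_num [cumNormal] at hv
                  omega
                have hl : 5 ≤ r := by
                  by_contra hcon
                  push_neg at hcon
                  have hv := hb4 4 (by omega) (by omega)
                  norm_num [cumNormal] at hv
                  omega
                have hreq : r = 5 := by omega
                rw [hreq]
                norm_num
              · rw [if_neg g5]
                by_cases g6 : day ≤ 0 + 31 + 28 + 31 + 30 + 31 + 30 + 31
                · rw [if_pos g6]
                  have hu : r ≤ 6 := by
                    by_contra hcon
                    push_neg at hcon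
                    have hv := hb3 6 (by omega) (by omega)
                    norm_num [cumNormal] at hv
                    omega
                  have hl : 6 ≤ r := by
                    by_contra hcon
                    push_neg at hcon
                    have hv := hb4 5 (by omega) (by omega)
                    norm_num [cumNormal] at hv
                    omega
                  have hreq : r = 6 := by omega
                  rw [hreq]
                  norm_num
                · rw [if_neg g6]
                  by_cases g7 : day ≤ 0 + 31 + 28 + 31 + 30 + 31 + 30 + 31 + 31
                  · rw [if_pos g7]
                    have hu : r ≤ 7 := by
                      by_contra hcon
                      push_neg at hcon
                      have hv := hb3 7 (by omega) (by omega)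
                      norm_num [cumNormal] at hv
                      omega
                    have hl : 7 ≤ r := by
                      by_contra hcon
                      push_neg at hcon
                      have hv := hb4 6 (by omega) (by omega)
                      norm_num [cumNormal] at hv
                      omega
                    have hreq : r = 7 := by omega
                    rw [hreq]
                    norm_num
                  · rw [if_neg g7]
                    by_cases g8 : day ≤ 0 + 31 + 28 + 31 + 30 + 31 + 30 + 31 + 31 + 30
                    · rw [if_pos g8]
                      have hu : r ≤ 8 := by
                        by_contra hcon
                        push_neg at hcon
                        have hv := hb3 8 (by omega) (by omega)
                        norm_num [cumNormal] at hv
                        omega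
                      have hl : 8 ≤ r := by
                        by_contra hcon
                        push_neg at hcon
                        have hv := hb4 7 (by omega) (by omega)
                        norm_num [cumNormal] at hv
                        omega
                      have hreq : r = 8 := by omega
                      rw [hreq]
                      norm_num
                    · rw [if_neg g8]
                      by_cases g9 : day ≤ 0 + 31 + 28 + 31 + 30 + 31 + 30 + 31 + 31 + 30 + 31
                      · rw [if_pos g9]
                        have hu : r ≤ 9 := by
                          by_contra hcon
                          push_neg at hcon
                          have hv := hb3 9 (by omega) (by omega)
                          norm_num [cumNormal] at hv
                          omega
                        have hl : 9 ≤ r := by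
                          by_contra hcon
                          push_neg at hcon
                          have hv := hb4 8 (by omega) (by omega)
                          norm_num [cumNormal] at hv
                          omega
                        have hreq : r = 9 := by omega
                        rw [hreq]
                        norm_num
                      · rw [if_neg g9]
                        by_cases g10 : day ≤ 0 + 31 + 28 + 31 + 30 + 31 + 30 + 31 + 31 + 30 + 31 + 30
                        · rw [if_pos g10]
                          have hu : r ≤ 10 := by
                            by_contra hcon
                            push_neg at hcon
                            have hv := hb3 10 (by omega) (by omega)
                            norm_num [cumNormal] at hv
                            omega
                          have hl : 10 ≤ r := by
                            by_contra hcon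
                            push_neg at hcon
                            have hv := hb4 9 (by omega) (by omega)
                            norm_num [cumNormal] at hv
                            omega
                          have hreq : r = 10 := by omega
                          rw [hreq]
                          norm_num
                        · rw [if_neg g10]
                          by_cases g11 : day ≤ 0 + 31 + 28 + 31 + 30 + 31 + 30 + 31 + 31 + 30 + 31 + 30 + 31
                          · rw [if_pos g11]
                            have hu : r ≤ 11 := by
                              by_contra hcon
                              push_neg at hcon
                              have hv := hb3 11 (by omega) (by omega)
                              norm_num [cumNormal] at hv
                              omega
                            have hl : 11 ≤ r := by
                              by_contra hcon
                              push_neg at hcon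
                              have hv := hb4 10 (by omega) (by omega)
                              norm_num [cumNormal] at hv
                              omega
                            have hreq : r = 11 := by omega
                            rw [hreq]
                            norm_num
                          · rw [if_neg g11]
                            have hl : 12 ≤ r := by
                              by_contra hcon
                              push_neg at hcon
                              have hv := hb4 11 (by omega) (by omega)
                              norm_num [cumNormal] at hv
                              omega
                            have hreq : r = 12 := by omega
                            rw [hreq]
                            norm_num
  · -- leap = true
    show monthLoopA day 0 0 [31, 29, 31, 30, 31, 30, 31, 31, 30, 31, 30, 31] = min ((bsearchB cumLeap day 0 12 : Nat) : Int) 11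
    obtain ⟨hb1, hb2, hb3, hb4⟩ := bs_correct cumLeap day 0 12 cumLeap_mono (by norm_num [cumLeap])
    have hb2' : bsearchB cumLeap day 0 12 ≤ 12 := by simpa using hb2
    generalize hgen : bsearchB cumLeap day 0 12 = r at hb1 hb2' hb3 hb4 ⊢
    simp only [monthLoopA]
    by_cases g0 : day ≤ 0 + 31
    · rw [if_pos g0]
      have hu : r ≤ 0 := by
        by_contra hcon
        push_neg at hcon
        have hv := hb3 0 (by omega) (by omega)
        norm_num [cumLeap] at hv
        omega
      have hreq : r = 0 := by omega
      rw [hreq]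
      norm_num
    · rw [if_neg g0]
      by_cases g1 : day ≤ 0 + 31 + 29
      · rw [if_pos g1]
        have hu : r ≤ 1 := by
          by_contra hcon
          push_neg at hcon
          have hv := hb3 1 (by omega) (by omega)
          norm_num [cumLeap] at hv
          omega
        have hl : 1 ≤ r := by
          by_contra hcon
          push_neg at hcon
          have hv := hb4 0 (by omega) (by omega)
          norm_num [cumLeap] at hv
          omega
        have hreq : r = 1 := by omega
        rw [hreq]
        norm_num
      · rw [if_neg g1]
        by_cases g2 : day ≤ 0 + 31 + 29 + 31
        · rw [if_pos g2]
          have hu : r ≤ 2 := by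
            by_contra hcon
            push_neg at hcon
            have hv := hb3 2 (by omega) (by omega)
            norm_num [cumLeap] at hv
            omega
          have hl : 2 ≤ r := by
            by_contra hcon
            push_neg at hcon
            have hv := hb4 1 (by omega) (by omega)
            norm_num [cumLeap] at hv
            omega
          have hreq : r = 2 := by omega
          rw [hreq]
          norm_num
        · rw [if_neg g2]
          by_cases g3 : day ≤ 0 + 31 + 29 + 31 + 30
          · rw [if_pos g3]
            have hu : r ≤ 3 := by
              by_contra hcon
              push_neg at hcon
              have hv := hb3 3 (by omega) (by omega)
              norm_num [cumLeap] at hv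
              omega
            have hl : 3 ≤ r := by
              by_contra hcon
              push_neg at hcon
              have hv := hb4 2 (by omega) (by omega)
              norm_num [cumLeap] at hv
              omega
            have hreq : r = 3 := by omega
            rw [hreq]
            norm_num
          · rw [if_neg g3]
            by_cases g4 : day ≤ 0 + 31 + 29 + 31 + 30 + 31
            · rw [if_pos g4]
              have hu : r ≤ 4 := by
                by_contra hcon
                push_neg at hcon
                have hv := hb3 4 (by omega) (by omega)
                norm_num [cumLeap] at hv
                omega
              have hl : 4 ≤ r := by
                by_contra hcon
                push_neg at hcon
                have hv := hb4 3 (by omega) (by omega)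
                norm_num [cumLeap] at hv
                omega
              have hreq : r = 4 := by omega
              rw [hreq]
              norm_num
            · rw [if_neg g4]
              by_cases g5 : day ≤ 0 + 31 + 29 + 31 + 30 + 31 + 30
              · rw [if_pos g5]
                have hu : r ≤ 5 := by
                  by_contra hcon
                  push_neg at hcon
                  have hv := hb3 5 (by omega) (by omega)
                  norm_num [cumLeap] at hv
                  omega
                have hl : 5 ≤ r := by
                  by_contra hcon
                  push_neg at hcon
                  have hv := hb4 4 (by omega) (by omega)
                  norm_num [cumLeap] at hv
                  omega
                have hreq : r = 5 := by omega
                rw [hreq]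
                norm_num
              · rw [if_neg g5]
                by_cases g6 : day ≤ 0 + 31 + 29 + 31 + 30 + 31 + 30 + 31
                · rw [if_pos g6]
                  have hu : r ≤ 6 := by
                    by_contra hcon
                    push_neg at hcon
                    have hv := hb3 6 (by omega) (by omega)
                    norm_num [cumLeap] at hv
                    omega
                  have hl : 6 ≤ r := by
                    by_contra hcon
                    push_neg at hcon
                    have hv := hb4 5 (by omega) (by omega)
                    norm_num [cumLeap] at hv
                    omega
                  have hreq : r = 6 := by omega
                  rw [hreq]
                  norm_num
                · rw [if_neg g6]
                  by_cases g7 : day ≤ 0 + 31 + 29 + 31 + 30 + 31 + 30 + 31 + 31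
                  · rw [if_pos g7]
                    have hu : r ≤ 7 := by
                      by_contra hcon
                      push_neg at hcon
                      have hv := hb3 7 (by omega) (by omega)
                      norm_num [cumLeap] at hv
                      omega
                    have hl : 7 ≤ r := by
                      by_contra hcon
                      push_neg at hcon
                      have hv := hb4 6 (by omega) (by omega)
                      norm_num [cumLeap] at hv
                      omega
                    have hreq : r = 7 := by omega
                    rw [hreq]
                    norm_num
                  · rw [if_neg g7]
                    by_cases g8 : day ≤ 0 + 31 + 29 + 31 + 30 + 31 + 30 + 31 + 31 + 30
                    · rw [if_pos g8]
                      have hu : r ≤ 8 := by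
                        by_contra hcon
                        push_neg at hcon
                        have hv := hb3 8 (by omega) (by omega)
                        norm_num [cumLeap] at hv
                        omega
                      have hl : 8 ≤ r := by
                        by_contra hcon
                        push_neg at hcon
                        have hv := hb4 7 (by omega) (by omega)
                        norm_num [cumLeap] at hv
                        omega
                      have hreq : r = 8 := by omega
                      rw [hreq]
                      norm_num
                    · rw [if_neg g8]
                      by_cases g9 : day ≤ 0 + 31 + 29 + 31 + 30 + 31 + 30 + 31 + 31 + 30 + 31
                      · rw [if_pos g9]
                        have hu : r ≤ 9 := by
                          by_contra hcon
                          push_neg at hcon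
                          have hv := hb3 9 (by omega) (by omega)
                          norm_num [cumLeap] at hv
                          omega
                        have hl : 9 ≤ r := by
                          by_contra hcon
                          push_neg at hcon
                          have hv := hb4 8 (by omega) (by omega)
                          norm_num [cumLeap] at hv
                          omega
                        have hreq : r = 9 := by omega
                        rw [hreq]
                        norm_num
                      · rw [if_neg g9]
                        by_cases g10 : day ≤ 0 + 31 + 29 + 31 + 30 + 31 + 30 + 31 + 31 + 30 + 31 + 30
                        · rw [if_pos g10]
                          have hu : r ≤ 10 := by
                            by_contra hcon
                            push_neg at hcon
                            have hv := hb3 10 (by omega) (by omega)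
                            norm_num [cumLeap] at hv
                            omega
                          have hl : 10 ≤ r := by
                            by_contra hcon
                            push_neg at hcon
                            have hv := hb4 9 (by omega) (by omega)
                            norm_num [cumLeap] at hv
                            omega
                          have hreq : r = 10 := by omega
                          rw [hreq]
                          norm_num
                        · rw [if_neg g10]
                          by_cases g11 : day ≤ 0 + 31 + 29 + 31 + 30 + 31 + 30 + 31 + 31 + 30 + 31 + 30 + 31
                          · rw [if_pos g11]
                            have hu : r ≤ 11 := by
                              by_contra hcon
                              push_neg at hcon
                              have hv := hb3 11 (by omega) (by omega)
                              norm_num [cumLeap] at hv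
                              omega
                            have hl : 11 ≤ r := by
                              by_contra hcon
                              push_neg at hcon
                              have hv := hb4 10 (by omega) (by omega)
                              norm_num [cumLeap] at hv
                              omega
                            have hreq : r = 11 := by omega
                            rw [hreq]
                            norm_num
                          · rw [if_neg g11]
                            have hl : 12 ≤ r := by
                              by_contra hcon
                              push_neg at hcon
                              have hv := hb4 11 (by omega) (by omega)
                              norm_num [cumLeap] at hv
                              omega
                            have hreq : r = 12 := by omega
                            rw [hreq]
                            norm_num
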